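-- pv_equiv track=rewrite | github.com/Pedram-Fdi/CRP-PLT-SDDP | Tool.py | Transform6d
-- ===== SOURCE A (Python) =====
-- def Transform6d(array, dimension1, dimension2, dimension3, dimension4, dimension5, dimension6):
--     if len(array) != dimension1 * dimension2 * dimension3 * dimension4 * dimension5 * dimension6:
--         raise ValueError("Array size does not match the specified dimensions.")
--
--     result = [[[[[[array[i * (dimension2 * dimension3 * dimension4 * dimension5 * dimension6) +
--                                   j * (dimension3 * dimension4 * dimension5 * dimension6) +
--                                   k * (dimension4 * dimension5 * dimension6) +
--                                   l * (dimension5 * dimension6) +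
--                                   m * dimension6 +
--                                   n]
--                     for n in range(dimension6)]
--                     for m in range(dimension5)]
--                     for l in range(dimension4)]
--                     for k in range(dimension3)]
--                     for j in range(dimension2)]
--                     for i in range(dimension1)]
--     return result
-- ===== SOURCE B (Python) =====
-- def Transform6d(array, dimension1, dimension2, dimension3, dimension4, dimension5, dimension6):
--     if len(array) != dimension1 * dimension2 * dimension3 * dimension4 * dimension5 * dimension6:
--         raise ValueError("Array size does not match the specified dimensions.")
--
--     def build(chunk, dims):
--         if len(dims) == 1:
--             return chunk
--         size = 1
--         for d in dims[1:]:
--             size *= d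
--         return [build(chunk[t * size:(t + 1) * size], dims[1:]) for t in range(dims[0])]
--
--     return build(list(array), [dimension1, dimension2, dimension3,
--                                dimension4, dimension5, dimension6])
-- ===== Notes on version B (the rewrite author's own statement) =====
-- stated objective: alternative
-- what changed: B builds the 6D structure top-down by a generic recursive helper that slices the flat list into dims[0] contiguous chunks of size prod(dims[1:]) and recurses, instead of A's six nested comprehensions computing a linear stride index for every leaf element.
import Mathlib
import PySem

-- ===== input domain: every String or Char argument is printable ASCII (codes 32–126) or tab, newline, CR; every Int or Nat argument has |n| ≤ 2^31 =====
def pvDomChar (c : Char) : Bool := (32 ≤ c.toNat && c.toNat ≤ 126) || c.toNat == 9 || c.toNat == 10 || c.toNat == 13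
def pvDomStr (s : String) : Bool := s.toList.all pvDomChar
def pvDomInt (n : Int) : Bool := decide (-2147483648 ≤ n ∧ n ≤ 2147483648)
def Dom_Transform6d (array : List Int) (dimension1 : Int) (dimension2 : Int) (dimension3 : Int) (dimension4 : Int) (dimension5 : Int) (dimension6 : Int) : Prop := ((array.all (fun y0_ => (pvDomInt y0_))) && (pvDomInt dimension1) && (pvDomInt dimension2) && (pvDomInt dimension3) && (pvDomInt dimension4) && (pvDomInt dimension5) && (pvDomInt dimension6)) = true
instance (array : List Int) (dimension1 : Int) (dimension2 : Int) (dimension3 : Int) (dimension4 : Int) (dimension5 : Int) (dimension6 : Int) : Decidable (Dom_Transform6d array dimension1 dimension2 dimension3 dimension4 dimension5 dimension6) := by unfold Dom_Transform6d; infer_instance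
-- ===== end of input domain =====

-- ===== PORT A =====
-- B reshapes top-down by recursive slicing instead of computing a flat stride index per leaf (objective: alternative decomposition).

def Transform6d (array : List Int) (dimension1 : Int) (dimension2 : Int) (dimension3 : Int) (dimension4 : Int) (dimension5 : Int) (dimension6 : Int) : List (List (List (List (List (List Int))))) :=
  -- Pre_Transform6d excludes the size-mismatch inputs where Python raises ValueError; under Pre_
  -- every reached index is in range, so pyGet? is some and '.getD 0' is never the default.
  (PySem.List.pyRange 0 dimension1 1).map (fun i =>
    (PySem.List.pyRange 0 dimension2 1).map (fun j =>
      (PySem.List.pyRange 0 dimension3 1).map (fun k =>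
        (PySem.List.pyRange 0 dimension4 1).map (fun l =>
          (PySem.List.pyRange 0 dimension5 1).map (fun m =>
            (PySem.List.pyRange 0 dimension6 1).map (fun n =>
              (PySem.List.pyGet? array (i * (dimension2 * dimension3 * dimension4 * dimension5 * dimension6) +
                j * (dimension3 * dimension4 * dimension5 * dimension6) +
                k * (dimension4 * dimension5 * dimension6) +
                l * (dimension5 * dimension6) +
                m * dimension6 +
                n)).getD 0))))))

-- ===== PORT B =====
-- Source B's generic recursive 'build' is monomorphised into one helper per depth (the result type
-- differs at each level); each helper is the same code: slice the chunk into dims[0] pieces of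
-- size prod(dims[1:]) and recurse, the one-dimension base case returning the chunk itself.
def pvBuild5 (chunk : List Int) (d5 d6 : Int) : List (List Int) :=
  (PySem.List.pyRange 0 d5 1).map (fun t =>
    PySem.List.slice chunk (some (t * d6)) (some ((t + 1) * d6)))

def pvBuild4 (chunk : List Int) (d4 d5 d6 : Int) : List (List (List Int)) :=
  (PySem.List.pyRange 0 d4 1).map (fun t =>
    pvBuild5 (PySem.List.slice chunk (some (t * (d5 * d6))) (some ((t + 1) * (d5 * d6)))) d5 d6)

def pvBuild3 (chunk : List Int) (d3 d4 d5 d6 : Int) : List (List (List (List Int))) :=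
  (PySem.List.pyRange 0 d3 1).map (fun t =>
    pvBuild4 (PySem.List.slice chunk (some (t * (d4 * d5 * d6))) (some ((t + 1) * (d4 * d5 * d6)))) d4 d5 d6)

def pvBuild2 (chunk : List Int) (d2 d3 d4 d5 d6 : Int) : List (List (List (List (List Int)))) :=
  (PySem.List.pyRange 0 d2 1).map (fun t =>
    pvBuild3 (PySem.List.slice chunk (some (t * (d3 * d4 * d5 * d6))) (some ((t + 1) * (d3 * d4 * d5 * d6)))) d3 d4 d5 d6)

def Transform6d_alt (array : List Int) (dimension1 : Int) (dimension2 : Int) (dimension3 : Int) (dimension4 : Int) (dimension5 : Int) (dimension6 : Int) : List (List (List (List (List (List Int))))) :=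
  (PySem.List.pyRange 0 dimension1 1).map (fun t =>
    pvBuild2 (PySem.List.slice array (some (t * (dimension2 * dimension3 * dimension4 * dimension5 * dimension6))) (some ((t + 1) * (dimension2 * dimension3 * dimension4 * dimension5 * dimension6)))) dimension2 dimension3 dimension4 dimension5 dimension6)

-- ===== PRECONDITION & SPEC =====
-- Pre_ excludes exactly the inputs where A (and B) raise ValueError: array length ≠ product of the dimensions.
def Pre_Transform6d (array : List Int) (dimension1 : Int) (dimension2 : Int) (dimension3 : Int) (dimension4 : Int) (dimension5 : Int) (dimension6 : Int) : Prop :=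
  (array.length : Int) = dimension1 * dimension2 * dimension3 * dimension4 * dimension5 * dimension6
instance (array : List Int) (dimension1 : Int) (dimension2 : Int) (dimension3 : Int) (dimension4 : Int) (dimension5 : Int) (dimension6 : Int) : Decidable (Pre_Transform6d array dimension1 dimension2 dimension3 dimension4 dimension5 dimension6) := by unfold Pre_Transform6d; infer_instance

def pvWitness_Transform6d : List Int × Int × Int × Int × Int × Int × Int :=
  ([1, 2, 3, 4, 5, 6, 7, 8], 2, 2, 2, 1, 1, 1)

def Spec_Transform6d (array : List Int) (dimension1 : Int) (dimension2 : Int) (dimension3 : Int) (dimension4 : Int) (dimension5 : Int) (dimension6 : Int) (out : List (List (List (List (List (List Int)))))) : Prop := out = Transform6d_alt array dimension1 dimension2 dimension3 dimension4 dimension5 dimension6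
instance (array : List Int) (dimension1 : Int) (dimension2 : Int) (dimension3 : Int) (dimension4 : Int) (dimension5 : Int) (dimension6 : Int) (out : List (List (List (List (List (List Int)))))) : Decidable (Spec_Transform6d array dimension1 dimension2 dimension3 dimension4 dimension5 dimension6 out) := by unfold Spec_Transform6d; infer_instance

-- ===== CLAIM (what is proved, stated in full; the proofs are below) =====
def Claim_equal_Transform6d : Prop := ∀ (array : List Int) (dimension1 : Int) (dimension2 : Int) (dimension3 : Int) (dimension4 : Int) (dimension5 : Int) (dimension6 : Int), Dom_Transform6d array dimension1 dimension2 dimension3 dimension4 dimension5 dimension6 → Pre_Transform6d array dimension1 dimension2 dimension3 dimension4 dimension5 dimension6 → Spec_Transform6d array dimension1 dimension2 dimension3 dimension4 dimension5 dimension6 (Transform6d array dimension1 dimension2 dimension3 dimension4 dimension5 dimension6)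

-- ===== LEMMAS AND PROOFS =====

-- Composing two clamped slices with in-range nonnegative bounds.
lemma pv_slice_slice (xs : List Int) (a b c d : Int) (ha : 0 ≤ a) (hc : 0 ≤ c)
    (hcd : c ≤ d) (hdb : a + d ≤ b) :
    PySem.List.slice (PySem.List.slice xs (some a) (some b)) (some c) (some d)
      = PySem.List.slice xs (some (a + c)) (some (a + d)) := by
  have hd : 0 ≤ d := le_trans hc hcd
  have hb : 0 ≤ b := by linarith
  rw [PySem.List.slice_toNat _ ha hb, PySem.List.slice_toNat _ hc hd,
      PySem.List.slice_toNat _ (by linarith : (0:Int) ≤ a + c) (by linarith : (0:Int) ≤ a + d)]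
  simp only [List.drop_take, List.take_take, List.drop_drop]
  have h1 : min (d.toNat - c.toNat) (b.toNat - a.toNat - c.toNat) = (a + d).toNat - (a + c).toNat := by omega
  have h2 : a.toNat + c.toNat = (a + c).toNat := by omega
  rw [h1, h2]

-- An in-range slice [a : a+s] is the list of its elements read off by index.
lemma pv_slice_eq_map_get (xs : List Int) (a s : Int) (ha : 0 ≤ a) (hs : 0 ≤ s)
    (hlen : a + s ≤ (xs.length : Int)) :
    PySem.List.slice xs (some a) (some (a + s))
      = (PySem.List.pyRange 0 s 1).map (fun n => (PySem.List.pyGet? xs (a + n)).getD 0) := by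
  rw [PySem.List.slice_toNat _ ha (by linarith : (0:Int) ≤ a + s), PySem.List.pyRange_one, List.map_map]
  apply List.ext_getElem
  · simp; omega
  · intro i h1 h2
    simp only [List.getElem_take, List.getElem_drop, List.getElem_map, List.getElem_range,
      Function.comp_apply]
    have h0 : (0:Int) + (i:Int) = (i:Int) := by ring
    rw [h0, PySem.List.pyGet?_of_nonneg (h := by positivity)]
    have h3 : (a + (i:Int)).toNat = a.toNat + i := by omega
    rw [h3]
    have h4 : a.toNat + i < xs.length := by
      simp [List.length_take, List.length_drop] at h1; omega
    rw [List.getElem?_eq_getElem h4]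
    rfl

lemma pv_build5_spec (xs : List Int) (a d5 d6 : Int) (ha : 0 ≤ a)
    (hS : 0 ≤ d5 * d6) (hlen : a + d5 * d6 ≤ (xs.length : Int)) :
    pvBuild5 (PySem.List.slice xs (some a) (some (a + d5 * d6))) d5 d6
      = (PySem.List.pyRange 0 d5 1).map (fun m =>
          (PySem.List.pyRange 0 d6 1).map (fun n =>
            (PySem.List.pyGet? xs (a + m * d6 + n)).getD 0)) := by
  unfold pvBuild5
  apply List.map_congr_left
  intro m hm
  rw [PySem.List.mem_pyRange_one] at hm
  have hd6 : 0 ≤ d6 := by nlinarith [hm.1, hm.2]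
  rw [pv_slice_slice xs a (a + d5 * d6) (m * d6) ((m + 1) * d6) ha (mul_nonneg hm.1 hd6)
        (by nlinarith [hm.1, hm.2]) (by nlinarith [hm.1, hm.2])]
  have hb : a + (m + 1) * d6 = (a + m * d6) + d6 := by ring
  rw [hb, pv_slice_eq_map_get xs (a + m * d6) d6 (add_nonneg ha (mul_nonneg hm.1 hd6)) hd6
        (by nlinarith [hm.1, hm.2])]

lemma pv_build4_spec (xs : List Int) (a d4 d5 d6 : Int) (ha : 0 ≤ a)
    (hS : 0 ≤ d4 * (d5 * d6)) (hlen : a + d4 * (d5 * d6) ≤ (xs.length : Int)) :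
    pvBuild4 (PySem.List.slice xs (some a) (some (a + d4 * (d5 * d6)))) d4 d5 d6
      = (PySem.List.pyRange 0 d4 1).map (fun l =>
          (PySem.List.pyRange 0 d5 1).map (fun m =>
            (PySem.List.pyRange 0 d6 1).map (fun n =>
              (PySem.List.pyGet? xs (a + l * (d5 * d6) + m * d6 + n)).getD 0))) := by
  unfold pvBuild4
  apply List.map_congr_left
  intro l hl
  rw [PySem.List.mem_pyRange_one] at hl
  have hS56 : 0 ≤ d5 * d6 := by nlinarith [hl.1, hl.2]
  rw [pv_slice_slice xs a (a + d4 * (d5 * d6)) (l * (d5 * d6)) ((l + 1) * (d5 * d6)) ha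
        (mul_nonneg hl.1 hS56) (by nlinarith [hl.1, hl.2]) (by nlinarith [hl.1, hl.2])]
  have hb : a + (l + 1) * (d5 * d6) = (a + l * (d5 * d6)) + d5 * d6 := by ring
  rw [hb, pv_build5_spec xs (a + l * (d5 * d6)) d5 d6 (add_nonneg ha (mul_nonneg hl.1 hS56)) hS56
        (by nlinarith [hl.1, hl.2])]

lemma pv_build3_spec (xs : List Int) (a d3 d4 d5 d6 : Int) (ha : 0 ≤ a)
    (hS : 0 ≤ d3 * (d4 * d5 * d6)) (hlen : a + d3 * (d4 * d5 * d6) ≤ (xs.length : Int)) :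
    pvBuild3 (PySem.List.slice xs (some a) (some (a + d3 * (d4 * d5 * d6)))) d3 d4 d5 d6
      = (PySem.List.pyRange 0 d3 1).map (fun k =>
          (PySem.List.pyRange 0 d4 1).map (fun l =>
            (PySem.List.pyRange 0 d5 1).map (fun m =>
              (PySem.List.pyRange 0 d6 1).map (fun n =>
                (PySem.List.pyGet? xs (a + k * (d4 * d5 * d6) + l * (d5 * d6) + m * d6 + n)).getD 0)))) := by
  unfold pvBuild3
  apply List.map_congr_left
  intro k hk
  rw [PySem.List.mem_pyRange_one] at hk
  have hS456 : 0 ≤ d4 * d5 * d6 := by nlinarith [hk.1, hk.2]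
  rw [pv_slice_slice xs a (a + d3 * (d4 * d5 * d6)) (k * (d4 * d5 * d6)) ((k + 1) * (d4 * d5 * d6)) ha
        (mul_nonneg hk.1 hS456) (by nlinarith [hk.1, hk.2]) (by nlinarith [hk.1, hk.2])]
  have hb : a + (k + 1) * (d4 * d5 * d6) = (a + k * (d4 * d5 * d6)) + d4 * (d5 * d6) := by ring
  rw [hb, pv_build4_spec xs (a + k * (d4 * d5 * d6)) d4 d5 d6
        (add_nonneg ha (mul_nonneg hk.1 hS456)) (by nlinarith [hS456]) (by nlinarith [hk.1, hk.2])]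

lemma pv_build2_spec (xs : List Int) (a d2 d3 d4 d5 d6 : Int) (ha : 0 ≤ a)
    (hS : 0 ≤ d2 * (d3 * d4 * d5 * d6)) (hlen : a + d2 * (d3 * d4 * d5 * d6) ≤ (xs.length : Int)) :
    pvBuild2 (PySem.List.slice xs (some a) (some (a + d2 * (d3 * d4 * d5 * d6)))) d2 d3 d4 d5 d6
      = (PySem.List.pyRange 0 d2 1).map (fun j =>
          (PySem.List.pyRange 0 d3 1).map (fun k =>
            (PySem.List.pyRange 0 d4 1).map (fun l =>
              (PySem.List.pyRange 0 d5 1).map (fun m =>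
                (PySem.List.pyRange 0 d6 1).map (fun n =>
                  (PySem.List.pyGet? xs (a + j * (d3 * d4 * d5 * d6) + k * (d4 * d5 * d6) + l * (d5 * d6) + m * d6 + n)).getD 0))))) := by
  unfold pvBuild2
  apply List.map_congr_left
  intro j hj
  rw [PySem.List.mem_pyRange_one] at hj
  have hS3456 : 0 ≤ d3 * d4 * d5 * d6 := by nlinarith [hj.1, hj.2]
  rw [pv_slice_slice xs a (a + d2 * (d3 * d4 * d5 * d6)) (j * (d3 * d4 * d5 * d6)) ((j + 1) * (d3 * d4 * d5 * d6)) ha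
        (mul_nonneg hj.1 hS3456) (by nlinarith [hj.1, hj.2]) (by nlinarith [hj.1, hj.2])]
  have hb : a + (j + 1) * (d3 * d4 * d5 * d6) = (a + j * (d3 * d4 * d5 * d6)) + d3 * (d4 * d5 * d6) := by ring
  rw [hb, pv_build3_spec xs (a + j * (d3 * d4 * d5 * d6)) d3 d4 d5 d6
        (add_nonneg ha (mul_nonneg hj.1 hS3456)) (by nlinarith [hS3456]) (by nlinarith [hj.1, hj.2])]

-- ===== VERDICT (by name: the statement is the Claim_ definition above) =====
theorem Transform6d_spec : Claim_equal_Transform6d := by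
  intro array d1 d2 d3 d4 d5 d6 _ hpre
  unfold Pre_Transform6d at hpre
  unfold Spec_Transform6d Transform6d Transform6d_alt
  apply List.map_congr_left
  intro i hi
  rw [PySem.List.mem_pyRange_one] at hi
  have hlen0 : (0 : Int) ≤ (array.length : Int) := Int.natCast_nonneg _
  have hP : (array.length : Int) = d1 * (d2 * d3 * d4 * d5 * d6) := by
    rw [hpre]; ring
  have hS1 : 0 ≤ d2 * d3 * d4 * d5 * d6 := by nlinarith [hi.1, hi.2]
  have hb : (i + 1) * (d2 * d3 * d4 * d5 * d6)
      = i * (d2 * d3 * d4 * d5 * d6) + d2 * (d3 * d4 * d5 * d6) := by ring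
  rw [hb, pv_build2_spec]
  · exact mul_nonneg hi.1 hS1
  · nlinarith [hi.1, hi.2]
  · nlinarith [hi.1, hi.2]
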